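-- pv_equiv track=rewrite | github.com/fyr03/Valscope | oracle/vertical_oracle.py | _fix_trailing_commas
-- ===== SOURCE A (Python) =====
-- from typing import Optional, List, Dict, Set, Tuple
--
-- def _fix_trailing_commas(lines: List[str]) -> List[str]:
--     """修复因删行产生的尾部多余逗号。"""
--     result = []
--     for i, line in enumerate(lines):
--         # 找到下一个非空行的内容
--         next_content = ''
--         for j in range(i + 1, len(lines)):
--             if lines[j].strip():
--                 next_content = lines[j].strip()
--                 break
--         # 如果当前行末有逗号，而下一有效行是结束符 ')'，删除逗号
--         if line.rstrip().endswith(',') and next_content.startswith(')'):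
--             line = line.rstrip()[:-1]
--         result.append(line)
--     return result
-- ===== SOURCE B (Python) =====
-- from typing import List
--
-- def _fix_trailing_commas(lines: List[str]) -> List[str]:
--     """One backward pass: track the next non-empty line's stripped content."""
--     result = []
--     next_content = ''
--     for line in reversed(lines):
--         r = line.rstrip()
--         if r.endswith(',') and next_content.startswith(')'):
--             result.append(r[:-1])
--         else:
--             result.append(line)
--         s = line.strip()
--         if s:
--             next_content = s
--     result.reverse()
--     return result
-- ===== Notes on version B (the rewrite author's own statement) =====
-- stated objective: faster
-- what changed: Replaces the per-line forward rescan for the next non-empty line with a single backward pass that carries the next non-empty stripped content, making the function one pass.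
import Mathlib
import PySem

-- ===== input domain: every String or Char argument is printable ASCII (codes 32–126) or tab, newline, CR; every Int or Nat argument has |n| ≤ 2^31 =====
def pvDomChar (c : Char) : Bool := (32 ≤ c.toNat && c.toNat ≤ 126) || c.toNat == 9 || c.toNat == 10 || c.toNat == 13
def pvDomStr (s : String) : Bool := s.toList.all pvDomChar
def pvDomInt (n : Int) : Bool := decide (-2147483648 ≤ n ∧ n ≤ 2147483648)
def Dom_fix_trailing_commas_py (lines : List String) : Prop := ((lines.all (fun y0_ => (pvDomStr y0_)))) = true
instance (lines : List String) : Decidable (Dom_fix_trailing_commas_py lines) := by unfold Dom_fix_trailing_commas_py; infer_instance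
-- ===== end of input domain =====

-- B: one backward pass carrying the next non-empty stripped content instead of A's per-line forward rescan (return value only; neither mutates its argument).
-- ===== PORT A =====
-- inner 'for j in range(i+1, len(lines)): if lines[j].strip(): next_content = ...; break'
def aFindNext (lines : List String) : List Int → String
  | [] => ""
  | j :: js =>
    if PySem.Str.strip (PySem.List.pyGetD lines j "") ≠ "" then
      PySem.Str.strip (PySem.List.pyGetD lines j "")
    else aFindNext lines js

def fix_trailing_commas_py (lines : List String) : List String :=
  (PySem.List.enumerate lines 0).foldl (fun result il =>
    let i := il.1
    let line := il.2
    let next_content := aFindNext lines (PySem.List.pyRange (i + 1) (lines.length : Int) 1)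
    let line :=
      if PySem.Str.endswith (PySem.Str.rstrip line) "," && PySem.Str.startswith next_content ")" then
        PySem.Str.slice (PySem.Str.rstrip line) none (some (-1))
      else line
    result ++ [line]) []

-- ===== PORT B =====
def fix_trailing_commas_py_alt (lines : List String) : List String :=
  let st := lines.reverse.foldl (fun (st : List String × String) line =>
    let result := st.1
    let next_content := st.2
    let r := PySem.Str.rstrip line
    let result :=
      if PySem.Str.endswith r "," && PySem.Str.startswith next_content ")" then
        result ++ [PySem.Str.slice r none (some (-1))]
      else result ++ [line]
    let s := PySem.Str.strip line
    (result, if s ≠ "" then s else next_content)) ([], "")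
  st.1.reverse

-- ===== PRECONDITION & SPEC =====
def Spec_fix_trailing_commas_py (lines : List String) (out : List String) : Prop := out = fix_trailing_commas_py_alt lines
instance (lines : List String) (out : List String) : Decidable (Spec_fix_trailing_commas_py lines out) := by unfold Spec_fix_trailing_commas_py; infer_instance

-- ===== CLAIM (what is proved, stated in full; the proofs are below) =====
def Claim_equal_fix_trailing_commas_py : Prop := ∀ (lines : List String), Dom_fix_trailing_commas_py lines → Spec_fix_trailing_commas_py lines (fix_trailing_commas_py lines)

-- ===== LEMMAS AND PROOFS =====

-- ===== VERDICT (by name: the statement is the Claim_ definition above) =====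
-- fixLine line nxt: the transformed line (same expression in both ports)
def fixLine (line nxt : String) : String :=
  if PySem.Str.endswith (PySem.Str.rstrip line) "," && PySem.Str.startswith nxt ")" then
    PySem.Str.slice (PySem.Str.rstrip line) none (some (-1))
  else line

-- nextC ls: stripped content of the first non-blank line of ls ('' if none)
def nextC : List String → String
  | [] => ""
  | l :: ls => if PySem.Str.strip l ≠ "" then PySem.Str.strip l else nextC ls

-- the common reference recursion
def specRec : List String → List String
  | [] => []
  | l :: ls => fixLine l (nextC ls) :: specRec ls

theorem aFindNext_range (full : List String) (k : Nat) :
    aFindNext full (PySem.List.pyRange (k : Int) (full.length : Int) 1) = nextC (full.drop k) := by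
  induction hn : full.length - k generalizing k with
  | zero =>
    have hk : full.length ≤ k := by omega
    have h1 : PySem.List.pyRange (k : Int) (full.length : Int) 1 = [] := by
      rw [PySem.List.pyRange_one]
      have : ((full.length : Int) - (k : Int)).toNat = 0 := by omega
      simp [this]
    have h2 : full.drop k = [] := List.drop_eq_nil_of_le hk
    simp [h1, h2, aFindNext, nextC]
  | succ n ih =>
    have hk : k < full.length := by omega
    rw [PySem.List.pyRange_one_cons (by exact_mod_cast hk)]
    have hc : ((k : Int) + 1) = (((k + 1 : Nat)) : Int) := by push_cast; ring
    rw [aFindNext, hc, ih (k + 1) (by omega)]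
    have hd : full.drop k = full[k] :: full.drop (k + 1) := (List.getElem_cons_drop hk).symm
    rw [hd, nextC, PySem.List.pyGetD_natCast, List.getD_eq_getElem?_getD,
      List.getElem?_eq_getElem hk]
    rfl

theorem A_eq_spec (full : List String) : ∀ (suf : List String) (s : Nat), full.drop s = suf →
    (PySem.List.enumerate suf (s : Int)).map
      (fun il => fixLine il.2 (aFindNext full (PySem.List.pyRange (il.1 + 1) (full.length : Int) 1)))
      = specRec suf := by
  intro suf
  induction suf with
  | nil => intro s h; simp [PySem.List.enumerate_nil, specRec]
  | cons l ls ih =>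
    intro s h
    have hs : s < full.length := by
      by_contra hge
      rw [List.drop_eq_nil_of_le (by omega)] at h
      exact (List.cons_ne_nil l ls) h.symm
    have hdrop : full.drop (s + 1) = ls := by
      rw [← List.tail_drop, h]
      rfl
    have hp : (((s : Int), l).1 + 1) = (((s + 1 : Nat)) : Int) := by push_cast; ring
    simp only [PySem.List.enumerate_cons, List.map_cons, specRec]
    rw [hp, aFindNext_range full (s + 1), hdrop, ih (s + 1) hdrop]

theorem B_state (lines : List String) :
    lines.foldr (fun line (st : List String × String) =>
      ((if PySem.Str.endswith (PySem.Str.rstrip line) "," && PySem.Str.startswith st.2 ")" then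
          st.1 ++ [PySem.Str.slice (PySem.Str.rstrip line) none (some (-1))]
        else st.1 ++ [line]),
       if PySem.Str.strip line ≠ "" then PySem.Str.strip line else st.2))
      (([] : List String), "")
    = ((specRec lines).reverse, nextC lines) := by
  induction lines with
  | nil => simp [specRec, nextC]
  | cons l ls ih =>
    rw [List.foldr_cons, ih]
    simp only [specRec, nextC, fixLine, List.reverse_cons]
    split <;> simp

-- ===== VERDICT =====
theorem fix_trailing_commas_py_spec : Claim_equal_fix_trailing_commas_py := by
  intro lines _
  unfold Spec_fix_trailing_commas_py
  have hA : fix_trailing_commas_py lines = specRec lines := by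
    have h0 : fix_trailing_commas_py lines
        = ((PySem.List.enumerate lines 0).foldl (fun result il =>
            result ++ [fixLine il.2
              (aFindNext lines (PySem.List.pyRange (il.1 + 1) (lines.length : Int) 1))]) []) := rfl
    rw [h0, PySem.List.foldl_append_singleton_eq_map]
    have := A_eq_spec lines lines 0 (by simp)
    simpa using this
  have hB : fix_trailing_commas_py_alt lines = specRec lines := by
    show (lines.reverse.foldl _ (([] : List String), "")).1.reverse = specRec lines
    rw [List.foldl_reverse]
    show (List.foldr (fun line (st : List String × String) =>
      ((if PySem.Str.endswith (PySem.Str.rstrip line) "," && PySem.Str.startswith st.2 ")" then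
          st.1 ++ [PySem.Str.slice (PySem.Str.rstrip line) none (some (-1))]
        else st.1 ++ [line]),
       if PySem.Str.strip line ≠ "" then PySem.Str.strip line else st.2))
      (([] : List String), "") lines).1.reverse = specRec lines
    rw [B_state lines]
    simp
  rw [hA, hB]
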